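-- pv_equiv track=rewrite | github.com/vulnz/dominator | core/live_report.py | safe_js_string
-- ===== SOURCE A (Python) =====
-- def safe_js_string(s):
--     """Safely escape a string for use in JavaScript"""
--     if s is None:
--         return ''
--     s = str(s)
--     for old, new in [('\\', '\\\\'), ("'", "\\'"), ('"', '\\"'), ('`', '\\`'),
--                      ('\n', '\\n'), ('\r', '\\r'), ('<', '&lt;'), ('>', '&gt;')]:
--         s = s.replace(old, new)
--     return s
-- ===== SOURCE B (Python) =====
-- _JS_ESCAPES = {'\\': '\\\\', "'": "\\'", '"': '\\"', '`': '\\`',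
--                '\n': '\\n', '\r': '\\r', '<': '&lt;', '>': '&gt;'}
--
-- def safe_js_string(s):
--     """Safely escape a string for use in JavaScript"""
--     if s is None:
--         return ''
--     return ''.join(_JS_ESCAPES.get(c, c) for c in str(s))
-- ===== Notes on version B (the rewrite author's own statement) =====
-- stated objective: idiomatic
-- what changed: Replaced eight sequential whole-string .replace() passes by a single character-level pass that maps each character through an escape table and joins the pieces.
import Mathlib
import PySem

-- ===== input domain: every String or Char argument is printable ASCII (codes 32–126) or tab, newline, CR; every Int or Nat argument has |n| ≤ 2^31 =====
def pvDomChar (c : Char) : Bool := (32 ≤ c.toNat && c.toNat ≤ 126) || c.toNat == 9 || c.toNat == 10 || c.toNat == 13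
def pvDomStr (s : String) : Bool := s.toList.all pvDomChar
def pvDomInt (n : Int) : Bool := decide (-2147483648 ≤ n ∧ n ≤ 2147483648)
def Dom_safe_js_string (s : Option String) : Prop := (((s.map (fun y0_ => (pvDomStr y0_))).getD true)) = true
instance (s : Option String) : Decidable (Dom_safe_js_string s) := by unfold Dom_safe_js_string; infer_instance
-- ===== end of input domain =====

-- B replaces A's eight sequential whole-string .replace passes by one character-level
-- pass through an escape table (idiomatic; same observable result, no side effects).

-- ===== PORT A =====
def safe_js_string (s : Option String) : String :=
  match s with
  | none => ""
  | some s0 =>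
    let s1 := PySem.Str.replace s0 "\\" "\\\\"
    let s2 := PySem.Str.replace s1 "'" "\\'"
    let s3 := PySem.Str.replace s2 "\"" "\\\""
    let s4 := PySem.Str.replace s3 "`" "\\`"
    let s5 := PySem.Str.replace s4 "\n" "\\n"
    let s6 := PySem.Str.replace s5 "\r" "\\r"
    let s7 := PySem.Str.replace s6 "<" "&lt;"
    let s8 := PySem.Str.replace s7 ">" "&gt;"
    s8

-- ===== PORT B =====
-- the escape table _JS_ESCAPES.get(c, c), as a char-to-piece function
def jsEsc (c : Char) : List Char :=
  if c = '\\' then ['\\', '\\']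
  else if c = '\'' then ['\\', '\'']
  else if c = '"' then ['\\', '"']
  else if c = '`' then ['\\', '`']
  else if c = '\n' then ['\\', 'n']
  else if c = '\r' then ['\\', 'r']
  else if c = '<' then ['&', 'l', 't', ';']
  else if c = '>' then ['&', 'g', 't', ';']
  else [c]

def safe_js_string_alt (s : Option String) : String :=
  match s with
  | none => ""
  | some s0 => String.ofList (s0.toList.flatMap jsEsc)

-- ===== PRECONDITION & SPEC =====
def Spec_safe_js_string (s : Option String) (out : String) : Prop := out = safe_js_string_alt s
instance (s : Option String) (out : String) : Decidable (Spec_safe_js_string s out) := by unfold Spec_safe_js_string; infer_instance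

-- ===== CLAIM (what is proved, stated in full; the proofs are below) =====
def Claim_equal_safe_js_string : Prop := ∀ (s : Option String), Dom_safe_js_string s → Spec_safe_js_string s (safe_js_string s)

-- ===== LEMMAS AND PROOFS =====

-- one Python str.replace with a single-char pattern is a flatMap over the characters
def rep1 (o : Char) (w : List Char) (c : Char) : List Char := if c = o then w else [c]

theorem replace_go_single (o : Char) (w : List Char) :
    ∀ (fuel : Nat) (l acc : List Char), l.length ≤ fuel →
      PySem.Chars.replace.go [o] w fuel l acc = acc.reverse ++ l.flatMap (rep1 o w) := by
  intro fuel
  induction fuel with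
  | zero =>
    intro l acc h
    have : l = [] := List.eq_nil_of_length_eq_zero (Nat.le_zero.mp h)
    subst this
    simp [PySem.Chars.replace.go]
  | succ n ih =>
    intro l acc h
    cases l with
    | nil => simp [PySem.Chars.replace.go]
    | cons c t =>
      simp only [PySem.Chars.replace.go]
      by_cases hc : c = o
      · subst hc
        have hp : [c].isPrefixOf (c :: t) = true := by simp [List.isPrefixOf]
        rw [if_pos hp]
        rw [ih _ _ (by simpa using Nat.le_of_succ_le_succ h)]
        simp [rep1, List.flatMap_cons]
      · have hp : [o].isPrefixOf (c :: t) = false := by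
          simp [List.isPrefixOf]
          exact fun he => absurd he.symm hc
        rw [if_neg (by simp [hp])]
        rw [ih _ _ (by simpa using Nat.le_of_succ_le_succ h)]
        simp [rep1, hc, List.flatMap_cons]

theorem replace_single (o : Char) (w s : List Char) :
    PySem.Chars.replace s [o] w = s.flatMap (rep1 o w) := by
  simp only [PySem.Chars.replace, List.isEmpty]
  · exact replace_go_single o w s.length s [] (le_refl _)

-- the eight single-char passes composed act on one character exactly as the table jsEsc
theorem chain_char (c : Char) :
    (((((((rep1 '\\' ['\\', '\\'] c).flatMap (rep1 '\'' ['\\', '\''])).flatMap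
      (rep1 '"' ['\\', '"'])).flatMap (rep1 '`' ['\\', '`'])).flatMap
      (rep1 '\n' ['\\', 'n'])).flatMap (rep1 '\r' ['\\', 'r'])).flatMap
      (rep1 '<' ['&', 'l', 't', ';'])).flatMap (rep1 '>' ['&', 'g', 't', ';']) = jsEsc c := by
  by_cases h1 : c = '\\'
  · subst h1; decide
  by_cases h2 : c = '\''
  · subst h2; decide
  by_cases h3 : c = '"'
  · subst h3; decide
  by_cases h4 : c = '`'
  · subst h4; decide
  by_cases h5 : c = '\n'
  · subst h5; decide
  by_cases h6 : c = '\r'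
  · subst h6; decide
  by_cases h7 : c = '<'
  · subst h7; decide
  by_cases h8 : c = '>'
  · subst h8; decide
  simp [rep1, jsEsc, h1, h2, h3, h4, h5, h6, h7, h8]

-- ===== VERDICT (by name: the statement is the Claim_ definition above) =====
theorem safe_js_string_spec : Claim_equal_safe_js_string := by
  intro s _
  unfold Spec_safe_js_string
  cases s with
  | none => rfl
  | some s0 =>
    show safe_js_string (some s0) = safe_js_string_alt (some s0)
    unfold safe_js_string safe_js_string_alt
    simp only [PySem.Str.replace]
    rw [String.toList_ofList, String.toList_ofList, String.toList_ofList,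
        String.toList_ofList, String.toList_ofList, String.toList_ofList,
        String.toList_ofList]
    refine congrArg String.ofList ?_
    simp only [show ("\\".toList : List Char) = ['\\'] from rfl,
      show ("\\\\".toList : List Char) = ['\\', '\\'] from rfl,
      show ("'".toList : List Char) = ['\''] from rfl,
      show ("\\'".toList : List Char) = ['\\', '\''] from rfl,
      show ("\"".toList : List Char) = ['"'] from rfl,
      show ("\\\"".toList : List Char) = ['\\', '"'] from rfl,
      show ("`".toList : List Char) = ['`'] from rfl,
      show ("\\`".toList : List Char) = ['\\', '`'] from rfl,
      show ("\n".toList : List Char) = ['\n'] from rfl,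
      show ("\\n".toList : List Char) = ['\\', 'n'] from rfl,
      show ("\r".toList : List Char) = ['\r'] from rfl,
      show ("\\r".toList : List Char) = ['\\', 'r'] from rfl,
      show ("<".toList : List Char) = ['<'] from rfl,
      show ("&lt;".toList : List Char) = ['&', 'l', 't', ';'] from rfl,
      show (">".toList : List Char) = ['>'] from rfl,
      show ("&gt;".toList : List Char) = ['&', 'g', 't', ';'] from rfl,
      replace_single]
    induction s0.toList with
    | nil => rfl
    | cons c t ih => simp only [List.flatMap_cons, List.flatMap_append, ih, chain_char]
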